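-- pv_equiv track=rewrite | github.com/liskos/zadanie25osipov | variant_02/22.py | f
-- ===== SOURCE A (Python) =====
-- def f(x):
--     a, b = 0, 1
--     while x > 0:
--         if x % 2 > 0:
--             a += x % 8
--         else:
--             b *= x % 8
--         x = x // 8
--     return a, b
-- ===== SOURCE B (Python) =====
-- def f(x):
--     digits = []
--     while x > 0:
--         digits.append(x % 8)
--         x //= 8
--     a = sum(d for d in digits if d % 2)
--     b = 1
--     for d in digits:
--         if d % 2 == 0:
--             b *= d
--     return a, b
-- ===== Notes on version B (the rewrite author's own statement) =====
-- stated objective: alternative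
-- what changed: A interleaves both accumulations inside one digit-extraction loop; B first materialises the list of octal digits, then computes the sum of odd digits and the product of even digits in two separate aggregation passes over that list.
import Mathlib
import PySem

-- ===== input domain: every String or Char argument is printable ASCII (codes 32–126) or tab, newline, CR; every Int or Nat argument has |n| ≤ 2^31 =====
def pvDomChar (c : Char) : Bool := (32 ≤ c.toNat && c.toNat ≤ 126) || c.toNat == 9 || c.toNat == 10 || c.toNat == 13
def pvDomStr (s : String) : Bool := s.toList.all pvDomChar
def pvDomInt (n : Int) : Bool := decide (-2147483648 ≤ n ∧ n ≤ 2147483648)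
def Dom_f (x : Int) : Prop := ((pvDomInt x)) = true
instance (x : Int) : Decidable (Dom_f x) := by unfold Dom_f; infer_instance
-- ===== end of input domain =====

-- B restructures A's single interleaved loop into digit-list extraction followed by two
-- separate aggregation passes; same cost (objective: alternative), identical results.

-- ===== PORT A =====
-- A's while loop: state (x, a, b), one interleaved accumulation per extracted octal digit.
def fAux (x a b : Int) : Int × Int :=
  if h : x > 0 then
    if PySem.Int.mod x 2 > 0 then
      fAux (PySem.Int.floordiv x 8) (a + PySem.Int.mod x 8) b
    else
      fAux (PySem.Int.floordiv x 8) a (b * PySem.Int.mod x 8)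
  else (a, b)
termination_by x.toNat
decreasing_by
  all_goals
    simp only [PySem.Int.floordiv_eq_ediv_of_pos (a := x) (by norm_num : (0:Int) < 8)]
    omega

def f (x : Int) : Int × Int := fAux x 0 1

-- ===== PORT B =====
-- the `digits` list built by B's first loop
def pyDigits (x : Int) : List Int :=
  if h : x > 0 then PySem.Int.mod x 8 :: pyDigits (PySem.Int.floordiv x 8) else []
termination_by x.toNat
decreasing_by
  simp only [PySem.Int.floordiv_eq_ediv_of_pos (a := x) (by norm_num : (0:Int) < 8)]
  omega

def f_alt (x : Int) : Int × Int :=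
  let digits := pyDigits x
  let a := (digits.filter (fun d => PySem.Int.mod d 2 != 0)).sum
  let b := digits.foldl (fun b d => if PySem.Int.mod d 2 = 0 then b * d else b) 1
  (a, b)

-- ===== PRECONDITION & SPEC =====
def Spec_f (x : Int) (out : Int × Int) : Prop := out = f_alt x
instance (x : Int) (out : Int × Int) : Decidable (Spec_f x out) := by unfold Spec_f; infer_instance

-- ===== CLAIM (what is proved, stated in full; the proofs are below) =====
def Claim_equal_f : Prop := ∀ (x : Int), Dom_f x → Spec_f x (f x)

-- ===== LEMMAS AND PROOFS =====

def sumOdd (l : List Int) : Int := (l.filter (fun d => PySem.Int.mod d 2 != 0)).sum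

def prodEven (l : List Int) : Int :=
  l.foldl (fun b d => if PySem.Int.mod d 2 = 0 then b * d else b) 1

theorem prodEven_foldl (l : List Int) (b : Int) :
    l.foldl (fun b d => if PySem.Int.mod d 2 = 0 then b * d else b) b = b * prodEven l := by
  induction l generalizing b with
  | nil => simp [prodEven]
  | cons d t ih =>
    simp only [prodEven, List.foldl_cons]
    rw [ih, ih (if PySem.Int.mod d 2 = 0 then 1 * d else 1)]
    split_ifs <;> ring

theorem sumOdd_cons (d : Int) (l : List Int) :
    sumOdd (d :: l) = (if PySem.Int.mod d 2 ≠ 0 then d else 0) + sumOdd l := by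
  simp only [sumOdd, List.filter_cons]
  split_ifs with h1 h2 h2 <;> simp_all

theorem prodEven_cons (d : Int) (l : List Int) :
    prodEven (d :: l) = (if PySem.Int.mod d 2 = 0 then d else 1) * prodEven l := by
  simp only [prodEven, List.foldl_cons]
  rw [prodEven_foldl]
  simp only [prodEven]
  split_ifs <;> ring

theorem fAux_eq (x a b : Int) :
    fAux x a b = (a + sumOdd (pyDigits x), b * prodEven (pyDigits x)) := by
  by_cases h : x > 0
  · have hm8 : PySem.Int.mod x 8 = x % 8 := PySem.Int.mod_eq_emod_of_pos (by norm_num)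
    have hm2 : PySem.Int.mod x 2 = x % 2 := PySem.Int.mod_eq_emod_of_pos (by norm_num)
    have hd2 : PySem.Int.mod (PySem.Int.mod x 8) 2 = x % 2 := by
      rw [hm8, PySem.Int.mod_eq_emod_of_pos (by norm_num)]; omega
    have ih := fAux_eq (PySem.Int.floordiv x 8)
    rw [fAux, pyDigits]
    simp only [h, dif_pos]
    by_cases hp : PySem.Int.mod x 2 > 0
    · have h1 : PySem.Int.mod (PySem.Int.mod x 8) 2 ≠ 0 := by
        rw [hd2]; rw [hm2] at hp; omega
      rw [if_pos hp, ih, sumOdd_cons, prodEven_cons, if_pos h1, if_neg h1]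
      refine Prod.ext ?_ ?_ <;> simp <;> ring
    · have h1 : PySem.Int.mod (PySem.Int.mod x 8) 2 = 0 := by
        rw [hd2]; rw [hm2] at hp
        have : 0 ≤ x % 2 := Int.emod_nonneg x (by norm_num)
        omega
      rw [if_neg hp, ih, sumOdd_cons, prodEven_cons, if_pos h1, if_neg (not_not_intro h1)]
      refine Prod.ext ?_ ?_ <;> simp <;> ring
  · rw [fAux, pyDigits]
    simp [h, sumOdd, prodEven]
termination_by x.toNat
decreasing_by
  all_goals
    simp only [PySem.Int.floordiv_eq_ediv_of_pos (a := x) (by norm_num : (0:Int) < 8)]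
    omega

-- ===== VERDICT (by name: the statement is the Claim_ definition above) =====
theorem f_spec : Claim_equal_f := by
  intro x _
  show f x = f_alt x
  rw [f, fAux_eq, f_alt]
  simp [sumOdd, prodEven]
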